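-- pv_equiv track=rewrite | github.com/mikemartinez13/project-penney-440 | simulation.py | run_game
-- ===== SOURCE A (Python) =====
-- from typing import List, Tuple
--
-- def run_game(sequence:List[str], p1_seq:str, p2_seq:str) -> Tuple[int,int]:
--     if p1_seq == p2_seq:
--         return 0, 0, 'T', 0, 0, 'T'
--     stack = ''
--     p1score_trick,p1score_cards,p2score_trick,p2score_cards = 0,0,0,0
--
--     for card in sequence:
--         stack+=card
--         curstack = stack[-3:]
--         if curstack == p1_seq:
--             p1score_trick+=1 # using "trick" method to count
--             p1score_cards+=len(stack)
--             stack = ''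
--         elif curstack == p2_seq:
--             p2score_trick+=1
--             p2score_cards+=len(stack)
--             stack = ''
--
--     trick_outcome = 'p1' if p1score_trick > p2score_trick else 'p2' if p2score_trick > p1score_trick else 'T'
--     cards_outcome = 'p1' if p1score_cards > p2score_cards else 'p2' if p2score_cards > p1score_cards else 'T'
--
--     return p1score_trick, p2score_trick, trick_outcome, p1score_cards, p2score_cards, cards_outcome # (if positive, p1 won. If negative, p2 won. If 0, tie)
-- ===== SOURCE B (Python) =====
-- def _tricks(seq, p1_seq, p2_seq):
--     # Recursively split the card sequence into completed tricks.
--     # Each trick is (winner, card_count); the trailing unfinished remainder is dropped.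
--     text = ''
--     for i, card in enumerate(seq):
--         text += card
--         tail = text[-3:]
--         if tail == p1_seq:
--             return [(1, len(text))] + _tricks(seq[i + 1:], p1_seq, p2_seq)
--         if tail == p2_seq:
--             return [(2, len(text))] + _tricks(seq[i + 1:], p1_seq, p2_seq)
--     return []
--
-- def run_game(sequence, p1_seq, p2_seq):
--     if p1_seq == p2_seq:
--         return 0, 0, 'T', 0, 0, 'T'
--     tricks = _tricks(sequence, p1_seq, p2_seq)
--     p1t = sum(1 for w, _ in tricks if w == 1)
--     p2t = len(tricks) - p1t
--     p1c = sum(c for w, c in tricks if w == 1)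
--     p2c = sum(c for w, c in tricks if w == 2)
--     trick_outcome = 'p1' if p1t > p2t else 'p2' if p2t > p1t else 'T'
--     cards_outcome = 'p1' if p1c > p2c else 'p2' if p2c > p1c else 'T'
--     return p1t, p2t, trick_outcome, p1c, p2c, cards_outcome
-- ===== Notes on version B (the rewrite author's own statement) =====
-- stated objective: alternative
-- what changed: B decomposes the game into stages: a recursive splitter that cuts the sequence into a list of completed tricks (winner, card count), then separate aggregation passes (filters/sums over the trick list, with p2's trick count derived as len(tricks)-p1t) replace A's single fold with five mutable counters.
import Mathlib
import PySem

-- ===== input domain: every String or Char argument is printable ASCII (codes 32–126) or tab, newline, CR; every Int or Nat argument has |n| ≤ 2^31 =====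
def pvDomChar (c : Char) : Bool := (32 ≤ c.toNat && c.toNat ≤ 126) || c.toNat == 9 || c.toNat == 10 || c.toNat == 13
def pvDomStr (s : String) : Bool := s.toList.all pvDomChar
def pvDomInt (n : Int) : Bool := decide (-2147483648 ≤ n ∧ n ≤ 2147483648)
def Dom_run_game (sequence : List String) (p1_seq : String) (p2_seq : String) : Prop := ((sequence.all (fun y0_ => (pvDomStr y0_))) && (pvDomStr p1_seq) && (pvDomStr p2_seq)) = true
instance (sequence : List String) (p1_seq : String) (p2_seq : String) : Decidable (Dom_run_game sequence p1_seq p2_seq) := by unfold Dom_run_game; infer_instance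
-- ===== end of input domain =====

-- B splits the sequence into a list of completed tricks by recursion, then aggregates
-- scores in separate passes (alternative decomposition; no side effects involved).


-- ===== PORT A =====
-- A's loop state: (stack, p1score_trick, p1score_cards, p2score_trick, p2score_cards);
-- stack is the full concatenation so far, curstack = stack[-3:] via PySem.List.slice.
def run_game_step (p1 p2 : List Char)
    (s : List Char × Int × Int × Int × Int) (card : String) :
    List Char × Int × Int × Int × Int :=
  let stack := s.1 ++ card.toList
  let curstack := PySem.List.slice stack (some (-3)) none
  if curstack = p1 then
    ([], s.2.1 + 1, s.2.2.1 + (stack.length : Int), s.2.2.2.1, s.2.2.2.2)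
  else if curstack = p2 then
    ([], s.2.1, s.2.2.1, s.2.2.2.1 + 1, s.2.2.2.2 + (stack.length : Int))
  else
    (stack, s.2.1, s.2.2.1, s.2.2.2.1, s.2.2.2.2)

def run_game (sequence : List String) (p1_seq : String) (p2_seq : String) :
    Int × Int × String × Int × Int × String :=
  if p1_seq = p2_seq then (0, 0, "T", 0, 0, "T")
  else
    let st := sequence.foldl (run_game_step p1_seq.toList p2_seq.toList) ([], 0, 0, 0, 0)
    let p1t := st.2.1; let p1c := st.2.2.1; let p2t := st.2.2.2.1; let p2c := st.2.2.2.2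
    let trick_outcome := if p1t > p2t then "p1" else if p2t > p1t then "p2" else "T"
    let cards_outcome := if p1c > p2c then "p1" else if p2c > p1c then "p2" else "T"
    (p1t, p2t, trick_outcome, p1c, p2c, cards_outcome)

-- ===== PORT B =====
-- B's _tricks: recursion over the sequence with the current trick's text as accumulator;
-- on a match it emits (winner, len(text)) and restarts on the remainder (text := '').
def tricks (p1 p2 : List Char) : List String → List Char → List (Int × Int)
  | [], _ => []
  | card :: rest, text =>
    let text' := text ++ card.toList
    let tail := PySem.List.slice text' (some (-3)) none
    if tail = p1 then (1, (text'.length : Int)) :: tricks p1 p2 rest []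
    else if tail = p2 then (2, (text'.length : Int)) :: tricks p1 p2 rest []
    else tricks p1 p2 rest text'

def run_game_alt (sequence : List String) (p1_seq : String) (p2_seq : String) :
    Int × Int × String × Int × Int × String :=
  if p1_seq = p2_seq then (0, 0, "T", 0, 0, "T")
  else
    let ts := tricks p1_seq.toList p2_seq.toList sequence []
    let p1t : Int := ((ts.filter (fun t => t.1 == 1)).map (fun _ => (1 : Int))).sum
    let p2t : Int := (ts.length : Int) - p1t
    let p1c : Int := ((ts.filter (fun t => t.1 == 1)).map Prod.snd).sum
    let p2c : Int := ((ts.filter (fun t => t.1 == 2)).map Prod.snd).sum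
    let trick_outcome := if p1t > p2t then "p1" else if p2t > p1t then "p2" else "T"
    let cards_outcome := if p1c > p2c then "p1" else if p2c > p1c then "p2" else "T"
    (p1t, p2t, trick_outcome, p1c, p2c, cards_outcome)

-- ===== PRECONDITION & SPEC =====
def Spec_run_game (sequence : List String) (p1_seq : String) (p2_seq : String) (out : Int × Int × String × Int × Int × String) : Prop := out = run_game_alt sequence p1_seq p2_seq
instance (sequence : List String) (p1_seq : String) (p2_seq : String) (out : Int × Int × String × Int × Int × String) : Decidable (Spec_run_game sequence p1_seq p2_seq out) := by unfold Spec_run_game; infer_instance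

-- ===== CLAIM =====
def Claim_equal_run_game : Prop := ∀ (sequence : List String) (p1_seq : String) (p2_seq : String), Dom_run_game sequence p1_seq p2_seq → Spec_run_game sequence p1_seq p2_seq (run_game sequence p1_seq p2_seq)

-- ===== LEMMAS AND PROOFS =====

-- aggregates over a trick list
def cnt1 (l : List (Int × Int)) : Int := ((l.filter (fun t => t.1 == 1)).map (fun _ => (1 : Int))).sum
def cnt2 (l : List (Int × Int)) : Int := ((l.filter (fun t => t.1 == 2)).map (fun _ => (1 : Int))).sum
def sum1 (l : List (Int × Int)) : Int := ((l.filter (fun t => t.1 == 1)).map Prod.snd).sum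
def sum2 (l : List (Int × Int)) : Int := ((l.filter (fun t => t.1 == 2)).map Prod.snd).sum

-- every trick has winner 1 or 2, so the two trick counts partition the list
theorem tricks_cnt (p1 p2 : List Char) (seq : List String) (text : List Char) :
    cnt1 (tricks p1 p2 seq text) + cnt2 (tricks p1 p2 seq text)
      = ((tricks p1 p2 seq text).length : Int) := by
  induction seq generalizing text with
  | nil => simp [tricks, cnt1, cnt2]
  | cons card rest ih =>
    simp only [tricks]
    split_ifs <;> simp [cnt1, cnt2] at ih ⊢ <;> have := ih ([] : List Char) <;> try exact ih _
    · have h := ih ([] : List Char); push_cast at h ⊢; omega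
    · have h := ih ([] : List Char); push_cast at h ⊢; omega

-- A's fold computes the aggregates of B's trick list, for any starting counters
theorem fold_counts (p1 p2 : List Char) (seq : List String) (text : List Char)
    (a b c d : Int) :
    let r := seq.foldl (run_game_step p1 p2) (text, a, b, c, d)
    let l := tricks p1 p2 seq text
    r.2.1 = a + cnt1 l ∧ r.2.2.1 = b + sum1 l ∧ r.2.2.2.1 = c + cnt2 l ∧ r.2.2.2.2 = d + sum2 l := by
  induction seq generalizing text a b c d with
  | nil => simp [tricks, cnt1, cnt2, sum1, sum2]
  | cons card rest ih =>
    simp only [List.foldl_cons, tricks, run_game_step]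
    split_ifs with h1 h2
    · have := ih [] (a + 1) (b + ((text ++ card.toList).length : Int)) c d
      simp [cnt1, cnt2, sum1, sum2] at this ⊢
      omega
    · have := ih [] a b (c + 1) (d + ((text ++ card.toList).length : Int))
      simp [cnt1, cnt2, sum1, sum2] at this ⊢
      omega
    · exact ih (text ++ card.toList) a b c d

-- ===== VERDICT =====
theorem run_game_spec : Claim_equal_run_game := by
  intro sequence p1_seq p2_seq _
  unfold Spec_run_game run_game run_game_alt
  by_cases hpq : p1_seq = p2_seq
  · simp [hpq]
  · simp only [hpq, if_false]
    have h := fold_counts p1_seq.toList p2_seq.toList sequence [] 0 0 0 0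
    have hc := tricks_cnt p1_seq.toList p2_seq.toList sequence []
    obtain ⟨h1, h2, h3, h4⟩ := h
    simp only [zero_add] at h1 h2 h3 h4
    rw [h1, h2, h3, h4]
    have hcnt2 : cnt2 (tricks p1_seq.toList p2_seq.toList sequence [])
        = ((tricks p1_seq.toList p2_seq.toList sequence []).length : Int)
          - cnt1 (tricks p1_seq.toList p2_seq.toList sequence []) := by omega
    simp only [cnt1, cnt2, sum1, sum2] at hcnt2 ⊢
    simp only [hcnt2]
    rfl
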